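-- pv_equiv track=rewrite | github.com/edwak97/aoc_solutions_25 | day9/sol_part2.py | getVerticalItems
-- ===== SOURCE A (Python) =====
-- def getVerticalItems(polygon):
--     vertical_items = dict()
--     for i in range(1, len(polygon)):
--         x_i, y_i = polygon[i]
--         _,   y_prev = polygon[i-1]
--
--         y_prev, y_i = min(y_i, y_prev), max(y_i, y_prev)
--
--         if y_i != y_prev:
--             if x_i in vertical_items:
--                 vertical_items[x_i].append((y_prev, y_i))
--             else:
--                 vertical_items[x_i] = [(y_prev, y_i)]
--     for x in vertical_items:
--         vertical_items[x].sort()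
--     return vertical_items
-- ===== SOURCE B (Python) =====
-- def getVerticalItems(polygon):
--     edges = [(x2, (min(y1, y2), max(y1, y2)))
--              for (_, y1), (x2, y2) in zip(polygon, polygon[1:])
--              if y1 != y2]
--     keys = list(dict.fromkeys(x for x, _ in edges))
--     return {x: sorted(seg for xx, seg in edges if xx == x) for x in keys}
-- ===== Notes on version B (the rewrite author's own statement) =====
-- stated objective: alternative
-- what changed: Replaces the index-driven loop that mutates dict buckets in place (append, then a second loop sorting each bucket) by a flat comprehension over zipped adjacent pairs producing normalized edges, an ordered key dedup via dict.fromkeys, and a dict comprehension that gathers and sorts each key's segments in one expression.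
import Mathlib
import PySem

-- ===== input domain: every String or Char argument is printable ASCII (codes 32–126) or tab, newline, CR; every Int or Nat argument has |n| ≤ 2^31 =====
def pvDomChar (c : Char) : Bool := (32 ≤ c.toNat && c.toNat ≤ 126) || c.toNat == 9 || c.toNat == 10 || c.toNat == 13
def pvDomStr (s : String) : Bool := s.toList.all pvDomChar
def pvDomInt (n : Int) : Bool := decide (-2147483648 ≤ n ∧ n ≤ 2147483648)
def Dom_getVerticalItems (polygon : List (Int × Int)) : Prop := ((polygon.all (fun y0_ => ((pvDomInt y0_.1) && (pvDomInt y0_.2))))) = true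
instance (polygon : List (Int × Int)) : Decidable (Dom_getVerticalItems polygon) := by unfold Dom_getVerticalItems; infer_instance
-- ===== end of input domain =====

-- B replaces A's index loop + in-place dict bucket mutation + second sorting loop by a flat
-- normalized-edge list over zipped adjacent pairs, an ordered key dedup, and a per-key gather-and-sort
-- (objective: alternative decomposition, same results; A mutates no arguments).


-- ===== PORT A =====
-- for i in range(1, len(polygon)): indices i and i-1 are always in range, ported with pyGetD.
-- 'if x_i in d: d[x_i].append(seg) else: d[x_i] = [seg]' sets d[x_i] = d.get(x_i, []) + [seg],
-- which is Dict.modify (key position is preserved by both branches, new keys append — exact).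
-- 'for x in d: d[x].sort()' sorts each bucket in place (Python tuple order = sorted2 on components).
def getVerticalItems (polygon : List (Int × Int)) : List (Int × List (Int × Int)) :=
  let d : PySem.Dict Int (List (Int × Int)) :=
    (PySem.List.pyRange 1 (polygon.length : Int)).foldl
      (fun d i =>
        let x_i := (PySem.List.pyGetD polygon i (0, 0)).1
        let y_i0 := (PySem.List.pyGetD polygon i (0, 0)).2
        let y_prev0 := (PySem.List.pyGetD polygon (i - 1) (0, 0)).2
        let y_prev := min y_i0 y_prev0
        let y_i := max y_i0 y_prev0
        if y_i ≠ y_prev then d.modify x_i [] (fun l => l ++ [(y_prev, y_i)]) else d)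
      PySem.Dict.empty
  d.items.map (fun p => (p.1, PySem.List.sorted2 p.2 (fun v => v.1) (fun v => v.2)))

-- ===== PORT B =====
-- zip(polygon, polygon[1:]) with polygon[1:] = drop 1 (exact); the comprehension's filter+value is filterMap;
-- dict.fromkeys key dedup is PySem.List.dedup; sorted(...) on pairs is sorted2 on components.
def getVerticalItems_alt (polygon : List (Int × Int)) : List (Int × List (Int × Int)) :=
  let edges : List (Int × (Int × Int)) :=
    (polygon.zip (polygon.drop 1)).filterMap
      (fun q => if q.1.2 ≠ q.2.2 then some (q.2.1, (min q.1.2 q.2.2, max q.1.2 q.2.2)) else none)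
  let keys := PySem.List.dedup (edges.map (fun e => e.1))
  keys.map (fun x =>
    (x, PySem.List.sorted2 ((edges.filter (fun e => e.1 == x)).map (fun e => e.2))
          (fun v => v.1) (fun v => v.2)))

-- ===== PRECONDITION & SPEC =====
def Spec_getVerticalItems (polygon : List (Int × Int)) (out : List (Int × List (Int × Int))) : Prop := out = getVerticalItems_alt polygon
instance (polygon : List (Int × Int)) (out : List (Int × List (Int × Int))) : Decidable (Spec_getVerticalItems polygon out) := by unfold Spec_getVerticalItems; infer_instance

-- ===== CLAIM (what is proved, stated in full; the proofs are below) =====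
def Claim_equal_getVerticalItems : Prop := ∀ (polygon : List (Int × Int)), Dom_getVerticalItems polygon → Spec_getVerticalItems polygon (getVerticalItems polygon)

-- ===== LEMMAS AND PROOFS =====

-- proof-only helpers: the shared edge list, the grouping dict, the bucket sort
def pvEdges (polygon : List (Int × Int)) : List (Int × (Int × Int)) :=
  (polygon.zip (polygon.drop 1)).filterMap
    (fun q => if q.1.2 ≠ q.2.2 then some (q.2.1, (min q.1.2 q.2.2, max q.1.2 q.2.2)) else none)

def pvDict (E : List (Int × (Int × Int))) : PySem.Dict Int (List (Int × Int)) :=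
  E.foldl (fun d e => d.modify e.1 [] (fun l => l ++ [e.2])) PySem.Dict.empty

def pvSortV (l : List (Int × Int)) : List (Int × Int) :=
  PySem.List.sorted2 l (fun v => v.1) (fun v => v.2)

lemma pvMapRange (polygon : List (Int × Int)) :
    (PySem.List.pyRange 1 (polygon.length : Int)).map
      (fun i => (PySem.List.pyGetD polygon (i - 1) ((0 : Int), (0 : Int)), PySem.List.pyGetD polygon i (0, 0)))
      = polygon.zip (polygon.drop 1) := by
  apply List.ext_getElem
  · simp [PySem.List.length_pyRange_one]
  · intro k h1 h2
    have hk : k < polygon.length - 1 := by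
      simpa [PySem.List.length_pyRange_one] using h1
    have hr : k < (PySem.List.pyRange 1 (polygon.length : Int)).length := by
      simpa using h1
    simp only [List.getElem_map, List.getElem_zip, List.getElem_drop]
    rw [PySem.List.getElem_pyRange_one _ _ _ hr]
    have e1 : (1 : Int) + (k : Int) - 1 = (k : Int) := by ring
    rw [e1]
    rw [PySem.List.pyGetD_eq_getElem polygon (0,0) (by positivity) (by exact_mod_cast (by omega : k < polygon.length))]
    rw [PySem.List.pyGetD_eq_getElem polygon (0,0) (by positivity) (by exact_mod_cast (by omega : 1 + k < polygon.length))]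
    congr 2

-- guarded fold = fold of the filterMap
lemma pvFoldlIf {α β γ : Type} (l : List α) (c : α → Prop) [DecidablePred c] (g : α → β) (f : γ → β → γ) (d : γ) :
    l.foldl (fun d a => if c a then f d (g a) else d) d
      = (l.filterMap (fun a => if c a then some (g a) else none)).foldl f d := by
  induction l generalizing d with
  | nil => rfl
  | cons a t ih =>
    by_cases h : c a <;> simp [h, ih]

-- A\'s edge extraction agrees with B\'s (min/max are symmetric; max ≠ min ↔ the two ys differ)
lemma pvEdgeCongr (q : (Int × Int) × (Int × Int)) :
    (if max q.2.2 q.1.2 ≠ min q.2.2 q.1.2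
       then some (q.2.1, (min q.2.2 q.1.2, max q.2.2 q.1.2)) else none)
      = (if q.1.2 ≠ q.2.2
       then some (q.2.1, (min q.1.2 q.2.2, max q.1.2 q.2.2)) else none) := by
  rcases q with ⟨⟨x1, y1⟩, ⟨x2, y2⟩⟩
  by_cases h : y1 = y2
  · simp [h]
  · have hmm : max y2 y1 ≠ min y2 y1 := by
      rcases le_total y1 y2 with hle | hle <;> simp [hle] <;> omega
    simp only []
    rw [if_pos hmm, if_pos (by omega : y1 ≠ y2), min_comm y2 y1, max_comm y2 y1]

lemma pvA_eq (polygon : List (Int × Int)) :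
    getVerticalItems polygon
      = (pvDict (pvEdges polygon)).items.map (fun p => (p.1, pvSortV p.2)) := by
  show ((PySem.List.pyRange 1 (polygon.length : Int)).foldl
      (fun d i =>
        let x_i := (PySem.List.pyGetD polygon i ((0 : Int), (0 : Int))).1
        let y_i0 := (PySem.List.pyGetD polygon i (0, 0)).2
        let y_prev0 := (PySem.List.pyGetD polygon (i - 1) (0, 0)).2
        let y_prev := min y_i0 y_prev0
        let y_i := max y_i0 y_prev0
        if y_i ≠ y_prev then d.modify x_i [] (fun l => l ++ [(y_prev, y_i)]) else d)
      PySem.Dict.empty).items.map (fun p => (p.1, pvSortV p.2)) = _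
  congr 1
  have hb :
      (PySem.List.pyRange 1 (polygon.length : Int)).foldl
        (fun d i =>
          let x_i := (PySem.List.pyGetD polygon i ((0 : Int), (0 : Int))).1
          let y_i0 := (PySem.List.pyGetD polygon i (0, 0)).2
          let y_prev0 := (PySem.List.pyGetD polygon (i - 1) (0, 0)).2
          let y_prev := min y_i0 y_prev0
          let y_i := max y_i0 y_prev0
          if y_i ≠ y_prev then d.modify x_i [] (fun l => l ++ [(y_prev, y_i)]) else d)
        (PySem.Dict.empty : PySem.Dict Int (List (Int × Int)))
        = ((PySem.List.pyRange 1 (polygon.length : Int)).map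
            (fun i => (PySem.List.pyGetD polygon (i - 1) ((0 : Int), (0 : Int)), PySem.List.pyGetD polygon i (0, 0)))).foldl
            (fun d q =>
              if max q.2.2 q.1.2 ≠ min q.2.2 q.1.2
                then d.modify q.2.1 [] (fun l => l ++ [(min q.2.2 q.1.2, max q.2.2 q.1.2)]) else d)
            PySem.Dict.empty := by
    rw [List.foldl_map]
  rw [hb, pvMapRange]
  rw [pvFoldlIf (polygon.zip (polygon.drop 1))
      (fun q => max q.2.2 q.1.2 ≠ min q.2.2 q.1.2)
      (fun q => (q.2.1, (min q.2.2 q.1.2, max q.2.2 q.1.2)))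
      (fun (d : PySem.Dict Int (List (Int × Int))) e => d.modify e.1 [] (fun l => l ++ [e.2]))]
  unfold pvDict pvEdges
  have hfm : ((polygon.zip (polygon.drop 1)).filterMap
        (fun a => if max a.2.2 a.1.2 ≠ min a.2.2 a.1.2
          then some (a.2.1, (min a.2.2 a.1.2, max a.2.2 a.1.2)) else none))
      = ((polygon.zip (polygon.drop 1)).filterMap
        (fun q => if q.1.2 ≠ q.2.2 then some (q.2.1, (min q.1.2 q.2.2, max q.1.2 q.2.2)) else none)) :=
    List.filterMap_congr (fun q _ => pvEdgeCongr q)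
  rw [hfm]

lemma pvB_eq (polygon : List (Int × Int)) :
    getVerticalItems_alt polygon
      = (PySem.List.dedup ((pvEdges polygon).map (fun e => e.1))).map
          (fun x => (x, pvSortV (((pvEdges polygon).filter (fun e => e.1 == x)).map (fun e => e.2)))) := rfl

lemma pvDictChar (polygon : List (Int × Int)) :
    getVerticalItems polygon = getVerticalItems_alt polygon := by
  rw [pvA_eq, pvB_eq]
  have hkeys : (pvDict (pvEdges polygon)).keys
      = PySem.Set.ofList ((pvEdges polygon).map (fun e => e.1)) := by
    unfold pvDict
    rw [PySem.Dict.keys_foldl_modify_key (pvEdges polygon) (fun e => e.1) []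
        (fun _ e => (fun l => l ++ [e.2]))]
    simp [PySem.Set.update, PySem.Set.ofList]
  have hnd : (pvDict (pvEdges polygon)).keys.Nodup := by
    unfold pvDict
    exact PySem.Dict.nodup_keys_foldl_modify_key (pvEdges polygon) (fun e => e.1) []
      (fun _ e => (fun l => l ++ [e.2])) _ (by simp)
  rw [PySem.Dict.items_eq_map_keys _ hnd [], hkeys, List.map_map, PySem.List.dedup_eq_ofList]
  apply List.map_congr_left
  intro k _
  simp only [Function.comp]
  have hget : (pvDict (pvEdges polygon)).getD k []
      = ((pvEdges polygon).filter (fun p => p.1 == k)).map (fun e => e.2) := by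
    unfold pvDict
    rw [PySem.Dict.getD_foldl_modify_append (pvEdges polygon) PySem.Dict.empty k]
    simp
  rw [hget]

-- ===== VERDICT (by name: the statement is the Claim_ definition above) =====
theorem getVerticalItems_spec : Claim_equal_getVerticalItems := by
  intro polygon _
  unfold Spec_getVerticalItems
  exact pvDictChar polygon
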